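-- pv_equiv track=rewrite | github.com/Zettelkasten/sleepy | sleepy/grammar.py | get_line_col_from_pos
-- ===== SOURCE A (Python) =====
-- def get_line_col_from_pos(word, error_pos, num_before_context_lines=1, num_after_context_lines=1):
--   """
--   :param str word:
--   :param int error_pos:
--   :param int num_before_context_lines:
--   :param int num_after_context_lines:
--   :return: line + column, both starting counting at 1, as well as dict with context lines
--   :rtype: tuple[int,int,dict[int,str]]
--   """
--   assert 0 <= error_pos <= len(word)
--   if len(word) == 0:
--     return 0, 1, {0: '\n'}
--   char_pos = 0
--   word_lines = word.splitlines()
--   assert len(word_lines) > 0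
--   for line_num, line in enumerate(word_lines):
--     assert char_pos <= error_pos
--     if error_pos <= char_pos + len(line):
--       col_num = error_pos - char_pos
--       assert 0 <= col_num <= len(line)
--       context_lines = {
--         context_line_num + 1: word_lines[context_line_num]
--         for context_line_num in range(
--           max(0, line_num - num_before_context_lines), min(len(word_lines), line_num + num_after_context_lines + 1))}
--       return line_num + 1, col_num + 1, context_lines
--     char_pos += len(line) + 1  # consider end-of-line symbol
--   assert char_pos == len(word)
--   context_lines = {
--     context_line_num + 1: word_lines[context_line_num]
--     for context_line_num in range(max(0, len(word_lines) - num_before_context_lines), len(word_lines))}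
--   return len(word_lines), len(word_lines[-1]) + 1, context_lines
-- ===== SOURCE B (Python) =====
-- def get_line_col_from_pos(word, error_pos, num_before_context_lines=1, num_after_context_lines=1):
--   """Offset-table + binary-search re-implementation: one cumulative line-start
--   table, then bisect for the line instead of a linear scan."""
--   assert 0 <= error_pos <= len(word)
--   if not word:
--     return 0, 1, {0: '\n'}
--   lines = word.splitlines()
--   offsets = [0]
--   for line in lines:
--     offsets.append(offsets[-1] + len(line) + 1)
--   n = len(lines)
--   if error_pos >= offsets[n]:
--     # only reachable when the word ends with a line separator
--     start = max(0, n - num_before_context_lines)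
--     return n, len(lines[-1]) + 1, {i + 1: lines[i] for i in range(start, n)}
--   lo, hi = 1, n
--   while lo < hi:
--     mid = (lo + hi) // 2
--     if offsets[mid] <= error_pos:
--       lo = mid + 1
--     else:
--       hi = mid
--   line_num = lo - 1
--   col_num = error_pos - offsets[line_num]
--   context = {i + 1: lines[i]
--              for i in range(max(0, line_num - num_before_context_lines),
--                             min(n, line_num + num_after_context_lines + 1))}
--   return line_num + 1, col_num + 1, context
-- ===== Notes on version B (the rewrite author's own statement) =====
-- stated objective: alternative
-- what changed: Replaces A's linear scan over the lines (carrying a running char_pos) by a cumulative line-start offset table built once plus a hand-written binary search (bisect_right) over it to locate the error line, with the trailing-separator fallthrough as its own branch.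
import Mathlib
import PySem

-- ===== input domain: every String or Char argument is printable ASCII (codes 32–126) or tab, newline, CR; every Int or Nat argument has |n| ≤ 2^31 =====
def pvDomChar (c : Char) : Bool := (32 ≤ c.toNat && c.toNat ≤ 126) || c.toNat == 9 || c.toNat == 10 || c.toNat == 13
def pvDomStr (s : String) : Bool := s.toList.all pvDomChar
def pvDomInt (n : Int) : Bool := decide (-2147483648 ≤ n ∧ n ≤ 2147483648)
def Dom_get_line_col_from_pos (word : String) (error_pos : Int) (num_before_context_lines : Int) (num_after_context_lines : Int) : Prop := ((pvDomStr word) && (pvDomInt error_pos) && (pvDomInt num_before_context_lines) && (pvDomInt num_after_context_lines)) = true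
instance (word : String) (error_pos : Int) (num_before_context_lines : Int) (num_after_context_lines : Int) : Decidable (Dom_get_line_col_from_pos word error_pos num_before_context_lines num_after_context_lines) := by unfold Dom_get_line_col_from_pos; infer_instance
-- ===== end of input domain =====

-- B replaces A's linear scan with a cumulative offset table + binary search (alternative decomposition,
-- same asymptotic cost overall); equivalence is about the return value only (neither mutates arguments).

-- ===== PORT A =====
-- the context-lines dict comprehension, identical in A's and B's Python
def pvCtx (lines : List String) (a b : Int) : List (Int × String) :=
  (PySem.List.pyRange a b 1).map (fun k => (k + 1, PySem.List.pyGetD lines k ""))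

-- A's for-loop over enumerate(word_lines) with running char_pos; [] = fallthrough after the loop
def pvA_loop (word_lines : List String) (error_pos nb na : Int) :
    List String → Nat → Int → Int × Int × (List (Int × String))
  | [], _, _ =>
      ((word_lines.length : Int),
        PySem.Str.len (PySem.List.pyGetD word_lines (-1) "") + 1,
        pvCtx word_lines (max 0 ((word_lines.length : Int) - nb)) (word_lines.length : Int))
  | line :: rest, line_num, char_pos =>
      if error_pos ≤ char_pos + PySem.Str.len line then
        ((line_num : Int) + 1, (error_pos - char_pos) + 1,
          pvCtx word_lines (max 0 ((line_num : Int) - nb))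
            (min (word_lines.length : Int) ((line_num : Int) + na + 1)))
      else
        pvA_loop word_lines error_pos nb na rest (line_num + 1) (char_pos + PySem.Str.len line + 1)

def get_line_col_from_pos (word : String) (error_pos : Int) (num_before_context_lines : Int) (num_after_context_lines : Int) : Int × Int × (List (Int × String)) :=
  if PySem.Str.len word = 0 then (0, 1, [((0 : Int), "\n")])
  else
    let word_lines := PySem.Str.splitlines word
    pvA_loop word_lines error_pos num_before_context_lines num_after_context_lines word_lines 0 0

-- ===== PORT B =====
-- hand-written bisect_right over the offset table (Source B's while loop; fuel = n bounds the
-- iteration count, each step shrinks hi-lo, so it never runs out);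
-- lo, hi are nonnegative Python ints, so Python's (lo+hi)//2 is exactly Nat division here
def pvB_bisect (offsets : List Int) (error_pos : Int) : Nat → Nat → Nat → Nat
  | 0, lo, _ => lo
  | fuel + 1, lo, hi =>
    if lo < hi then
      let mid := (lo + hi) / 2
      if PySem.List.pyGetD offsets (mid : Int) 0 ≤ error_pos then
        pvB_bisect offsets error_pos fuel (mid + 1) hi
      else
        pvB_bisect offsets error_pos fuel lo mid
    else lo

def get_line_col_from_pos_alt (word : String) (error_pos : Int) (num_before_context_lines : Int) (num_after_context_lines : Int) : Int × Int × (List (Int × String)) :=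
  if PySem.Str.len word = 0 then (0, 1, [((0 : Int), "\n")])
  else
    let lines := PySem.Str.splitlines word
    let offsets := lines.foldl
      (fun acc l => acc ++ [PySem.List.pyGetD acc (-1) 0 + PySem.Str.len l + 1]) [(0 : Int)]
    let n := lines.length
    if PySem.List.pyGetD offsets (n : Int) 0 ≤ error_pos then
      ((n : Int), PySem.Str.len (PySem.List.pyGetD lines (-1) "") + 1,
        pvCtx lines (max 0 ((n : Int) - num_before_context_lines)) (n : Int))
    else
      let lo := pvB_bisect offsets error_pos n 1 n
      let line : Int := (lo : Int) - 1
      (line + 1, error_pos - PySem.List.pyGetD offsets line 0 + 1,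
        pvCtx lines (max 0 (line - num_before_context_lines))
          (min (n : Int) (line + num_after_context_lines + 1)))

-- ===== PRECONDITION & SPEC =====
-- cumulative splitlines length, every line counted len(line)+1 (what A's char_pos reaches after the loop)
def pvSepLen (word : String) : Int :=
  (PySem.Str.splitlines word).foldl (fun a l => a + PySem.Str.len l + 1) 0

-- Pre_ excludes exactly the inputs where Python A raises AssertionError: error_pos outside [0, len(word)],
-- or error_pos at/past the splitlines-cumulative length when that differs from len(word) (words containing "\r\n").
def Pre_get_line_col_from_pos (word : String) (error_pos : Int) (num_before_context_lines : Int) (num_after_context_lines : Int) : Prop :=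
  0 ≤ error_pos ∧ error_pos ≤ PySem.Str.len word ∧
    (error_pos < pvSepLen word ∨ pvSepLen word = PySem.Str.len word)
instance (word : String) (error_pos : Int) (num_before_context_lines : Int) (num_after_context_lines : Int) : Decidable (Pre_get_line_col_from_pos word error_pos num_before_context_lines num_after_context_lines) := by unfold Pre_get_line_col_from_pos; infer_instance

def pvWitness_get_line_col_from_pos : String × Int × Int × Int := ("a", 0, 1, 1)

def Spec_get_line_col_from_pos (word : String) (error_pos : Int) (num_before_context_lines : Int) (num_after_context_lines : Int) (out : Int × Int × (List (Int × String))) : Prop := out = get_line_col_from_pos_alt word error_pos num_before_context_lines num_after_context_lines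
instance (word : String) (error_pos : Int) (num_before_context_lines : Int) (num_after_context_lines : Int) (out : Int × Int × (List (Int × String))) : Decidable (Spec_get_line_col_from_pos word error_pos num_before_context_lines num_after_context_lines out) := by unfold Spec_get_line_col_from_pos; infer_instance

-- ===== CLAIM (what is proved, stated in full; the proofs are below) =====
def Claim_equal_get_line_col_from_pos : Prop := ∀ (word : String) (error_pos : Int) (num_before_context_lines : Int) (num_after_context_lines : Int), Dom_get_line_col_from_pos word error_pos num_before_context_lines num_after_context_lines → Pre_get_line_col_from_pos word error_pos num_before_context_lines num_after_context_lines → Spec_get_line_col_from_pos word error_pos num_before_context_lines num_after_context_lines (get_line_col_from_pos word error_pos num_before_context_lines num_after_context_lines)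


-- ===== LEMMAS AND PROOFS =====

-- pvOff lines i = cumulative length of the first i lines, each counted len+1
def pvOff (lines : List String) (i : Nat) : Int :=
  ((lines.take i).map (fun l => PySem.Str.len l + 1)).sum

theorem pvOff_zero (lines : List String) : pvOff lines 0 = 0 := rfl

theorem pvOff_succ (lines : List String) (i : Nat) (h : i < lines.length) :
    pvOff lines (i + 1) = pvOff lines i + PySem.Str.len lines[i] + 1 := by
  unfold pvOff
  rw [List.take_add_one, List.getElem?_eq_getElem h]
  rw [List.map_append, List.sum_append]
  simp
  ring

theorem pvStrLen_nonneg (s : String) : 0 ≤ PySem.Str.len s := by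
  simp [PySem.Str.len_eq]

theorem pvOff_le (lines : List String) {i j : Nat} (hij : i ≤ j) (hj : j ≤ lines.length) :
    pvOff lines i ≤ pvOff lines j := by
  induction j with
  | zero => have : i = 0 := by omega
            simp [this]
  | succ j ih =>
    rcases Nat.lt_or_ge i (j + 1) with h | h
    · have h1 : pvOff lines i ≤ pvOff lines j := ih (by omega) (by omega)
      have h2 := pvOff_succ lines j (by omega)
      have h3 := pvStrLen_nonneg lines[j]
      omega
    · have : i = j + 1 := by omega
      simp [this]

theorem pvOff_length (lines : List String) :
    pvOff lines lines.length = lines.foldl (fun a l => a + PySem.Str.len l + 1) 0 := by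
  unfold pvOff
  rw [List.take_length, List.sum_eq_foldl, List.foldl_map]
  congr 1
  funext a l
  ring

-- the tail of B's offsets list after cumulative position c
def pvTail (c : Int) : List String → List Int
  | [] => []
  | l :: ls => (c + PySem.Str.len l + 1) :: pvTail (c + PySem.Str.len l + 1) ls

theorem pvFoldl_offsets (ls : List String) :
    ∀ (acc : List Int), acc ≠ [] →
      ls.foldl (fun acc l => acc ++ [PySem.List.pyGetD acc (-1) 0 + PySem.Str.len l + 1]) acc
        = acc ++ pvTail (PySem.List.pyGetD acc (-1) 0) ls := by
  induction ls with
  | nil => intro acc h; simp [pvTail]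
  | cons l ls ih =>
    intro acc h
    rw [List.foldl_cons]
    rw [ih (acc ++ [PySem.List.pyGetD acc (-1) 0 + PySem.Str.len l + 1]) (by simp)]
    rw [PySem.List.pyGetD_neg_one_append_singleton]
    simp [pvTail]

theorem pvTail_getD (ls : List String) :
    ∀ (c : Int) (i : Nat), i ≤ ls.length → (c :: pvTail c ls).getD i 0 = c + pvOff ls i := by
  induction ls with
  | nil =>
    intro c i h
    have : i = 0 := by simpa using h
    subst this
    simp [pvOff]
  | cons l ls ih =>
    intro c i h
    cases i with
    | zero => simp [pvOff]
    | succ j =>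
      have hj := ih (c + PySem.Str.len l + 1) j (by simpa using h)
      simp only [pvTail, List.getD_cons_succ] at *
      rw [hj]
      unfold pvOff
      rw [List.take_succ_cons, List.map_cons, List.sum_cons]
      ring

-- B's offsets list read at a valid index is pvOff
theorem pvOffsets_getD (lines : List String) (i : Nat) (h : i ≤ lines.length) :
    PySem.List.pyGetD
      (lines.foldl (fun acc l => acc ++ [PySem.List.pyGetD acc (-1) 0 + PySem.Str.len l + 1]) [(0 : Int)])
      (i : Int) 0 = pvOff lines i := by
  rw [pvFoldl_offsets lines [(0 : Int)] (by simp)]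
  have h0 : PySem.List.pyGetD [(0 : Int)] (-1) 0 = 0 := by decide
  rw [h0]
  rw [show ([(0 : Int)] ++ pvTail 0 lines) = (0 : Int) :: pvTail 0 lines from rfl]
  rw [PySem.List.pyGetD_natCast]
  have := pvTail_getD lines 0 i h
  simpa using this

-- binary-search invariant: the result r satisfies offsets[r-1] ≤ ep < offsets[r]
theorem pvB_bisect_spec (offsets : List Int) (ep : Int) (fuel : Nat) :
    ∀ (lo hi : Nat), 1 ≤ lo → lo ≤ hi → hi - lo ≤ fuel →
    PySem.List.pyGetD offsets ((lo : Int) - 1) 0 ≤ ep →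
    ep < PySem.List.pyGetD offsets (hi : Int) 0 →
    lo ≤ pvB_bisect offsets ep fuel lo hi ∧ pvB_bisect offsets ep fuel lo hi ≤ hi ∧
      PySem.List.pyGetD offsets ((pvB_bisect offsets ep fuel lo hi : Int) - 1) 0 ≤ ep ∧
      ep < PySem.List.pyGetD offsets ((pvB_bisect offsets ep fuel lo hi : Int)) 0 := by
  induction fuel with
  | zero =>
    intro lo hi h1 h2 hf hpre hpost
    have hlh : lo = hi := by omega
    rw [pvB_bisect]
    exact ⟨le_refl lo, by omega, hpre, by rw [hlh]; exact hpost⟩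
  | succ fuel ih =>
    intro lo hi h1 h2 hf hpre hpost
    rw [pvB_bisect]
    by_cases h : lo < hi
    · rw [if_pos h]
      dsimp only
      by_cases hc : PySem.List.pyGetD offsets (((lo + hi) / 2 : Nat) : Int) 0 ≤ ep
      · rw [if_pos hc]
        have hmid : (((lo + hi) / 2 + 1 : Nat) : Int) - 1 = (((lo + hi) / 2 : Nat) : Int) := by
          push_cast; ring
        have := ih ((lo + hi) / 2 + 1) hi (by omega) (by omega) (by omega)
          (by rw [hmid]; exact hc) hpost
        exact ⟨by omega, this.2.1, this.2.2.1, this.2.2.2⟩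
      · rw [if_neg hc]
        have := ih lo ((lo + hi) / 2) (by omega) (by omega) (by omega)
          hpre (by omega)
        exact ⟨this.1, by omega, this.2.2.1, this.2.2.2⟩
    · rw [if_neg h]
      have hlh : lo = hi := by omega
      exact ⟨le_refl lo, by omega, hpre, by rw [hlh]; exact hpost⟩

-- A's loop, entered at index i with char_pos = pvOff i, returns at line k-1
theorem pvA_loop_hit (lines : List String) (ep nb na : Int) (k : Nat)
    (hk1 : 1 ≤ k) (hkn : k ≤ lines.length)
    (hlo : pvOff lines (k - 1) ≤ ep) (hhi : ep < pvOff lines k) :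
    ∀ (i : Nat), i ≤ k - 1 →
      pvA_loop lines ep nb na (lines.drop i) i (pvOff lines i) =
        (((k - 1 : Nat) : Int) + 1, (ep - pvOff lines (k - 1)) + 1,
          pvCtx lines (max 0 (((k - 1 : Nat) : Int) - nb))
            (min (lines.length : Int) (((k - 1 : Nat) : Int) + na + 1))) := by
  intro i hik
  generalize hd : k - 1 - i = d
  induction d generalizing i with
  | zero =>
    have hi : i = k - 1 := by omega
    have hin : i < lines.length := by omega
    rw [← List.getElem_cons_drop hin]
    rw [pvA_loop]
    have hcond : ep ≤ pvOff lines i + PySem.Str.len lines[i] := by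
      have h2 := pvOff_succ lines i hin
      have h3 : i + 1 = k := by omega
      rw [h3] at h2
      omega
    rw [if_pos hcond]
    subst hi
    rfl
  | succ d ih =>
    have hin : i < lines.length := by omega
    rw [← List.getElem_cons_drop hin]
    rw [pvA_loop]
    have h2 := pvOff_succ lines i hin
    have hle : pvOff lines (i + 1) ≤ pvOff lines (k - 1) := pvOff_le lines (by omega) (by omega)
    have hcond : ¬ (ep ≤ pvOff lines i + PySem.Str.len lines[i]) := by omega
    rw [if_neg hcond]
    rw [show pvOff lines i + PySem.Str.len lines[i] + 1 = pvOff lines (i + 1) from by omega]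
    exact ih (i + 1) (by omega) (by omega)

-- A's loop falls through when ep is at/past the total cumulative length
theorem pvA_loop_miss (lines : List String) (ep nb na : Int)
    (h : pvOff lines lines.length ≤ ep) :
    ∀ (i : Nat), i ≤ lines.length →
      pvA_loop lines ep nb na (lines.drop i) i (pvOff lines i) =
        ((lines.length : Int),
          PySem.Str.len (PySem.List.pyGetD lines (-1) "") + 1,
          pvCtx lines (max 0 ((lines.length : Int) - nb)) (lines.length : Int)) := by
  intro i hik
  generalize hd : lines.length - i = d
  induction d generalizing i with
  | zero =>
    have hi : i = lines.length := by omega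
    subst hi
    rw [List.drop_length, pvA_loop]
  | succ d ih =>
    have hin : i < lines.length := by omega
    rw [← List.getElem_cons_drop hin]
    rw [pvA_loop]
    have h2 := pvOff_succ lines i hin
    have hle : pvOff lines (i + 1) ≤ pvOff lines lines.length := pvOff_le lines (by omega) (by omega)
    have hcond : ¬ (ep ≤ pvOff lines i + PySem.Str.len lines[i]) := by omega
    rw [if_neg hcond]
    rw [show pvOff lines i + PySem.Str.len lines[i] + 1 = pvOff lines (i + 1) from by omega]
    exact ih (i + 1) (by omega) (by omega)

-- ===== VERDICT (by name: the statement is the Claim_ definition above) =====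
theorem get_line_col_from_pos_spec : Claim_equal_get_line_col_from_pos := by
  intro word ep nb na _ hpre
  obtain ⟨h0, hlenw, hthird⟩ := hpre
  unfold Spec_get_line_col_from_pos get_line_col_from_pos get_line_col_from_pos_alt
  by_cases hw : PySem.Str.len word = 0
  · rw [if_pos hw, if_pos hw]
  · rw [if_neg hw, if_neg hw]
    dsimp only
    set lines := PySem.Str.splitlines word with hlines
    set offsets := lines.foldl
      (fun acc l => acc ++ [PySem.List.pyGetD acc (-1) 0 + PySem.Str.len l + 1]) [(0 : Int)]
      with hoffsets
    have hsep : pvSepLen word = pvOff lines lines.length := by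
      rw [pvOff_length]; rfl
    have hoffN : PySem.List.pyGetD offsets ((lines.length : Nat) : Int) 0 = pvOff lines lines.length :=
      pvOffsets_getD lines lines.length (le_refl _)
    by_cases hcase : PySem.List.pyGetD offsets ((lines.length : Nat) : Int) 0 ≤ ep
    · rw [if_pos hcase]
      have hmiss : pvOff lines lines.length ≤ ep := by omega
      have := pvA_loop_miss lines ep nb na hmiss 0 (by omega)
      rw [List.drop_zero, pvOff_zero] at this
      rw [this]
    · rw [if_neg hcase]
      have hlt : ep < pvOff lines lines.length := by omega
      have hn1 : 1 ≤ lines.length := by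
        by_contra hn
        have : lines.length = 0 := by omega
        rw [this] at hlt
        rw [pvOff_zero] at hlt
        omega
      have hpre1 : PySem.List.pyGetD offsets (((1 : Nat) : Int) - 1) 0 ≤ ep := by
        have h00 := pvOffsets_getD lines 0 (by omega)
        rw [pvOff_zero] at h00
        rw [show ((1 : Nat) : Int) - 1 = ((0 : Nat) : Int) from by norm_num, h00]
        exact h0
      have hpostn : ep < PySem.List.pyGetD offsets ((lines.length : Nat) : Int) 0 := by omega
      obtain ⟨hr1, hr2, hr3, hr4⟩ := pvB_bisect_spec offsets ep lines.length 1 lines.length (le_refl 1) hn1 (by omega) hpre1 hpostn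
      set r := pvB_bisect offsets ep lines.length 1 lines.length with hr
      have hcast : ((r : Nat) : Int) - 1 = (((r - 1 : Nat)) : Int) := by omega
      rw [hcast] at hr3 ⊢
      rw [pvOffsets_getD lines (r - 1) (by omega)] at hr3 ⊢
      have hr4' : ep < pvOff lines r := by
        rw [pvOffsets_getD lines r (by omega)] at hr4
        exact hr4
      have hhit := pvA_loop_hit lines ep nb na r (by omega) (by omega) hr3 hr4' 0 (by omega)
      rw [List.drop_zero, pvOff_zero] at hhit
      rw [hhit]
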